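-- pv_equiv track=rewrite | github.com/DerivedFunction01/sec-nlp | defs/text_cleaner.py | strip_angle_brackets
-- ===== SOURCE A (Python) =====
-- def strip_angle_brackets(text: str) -> tuple[str, list[int]]:
--     """
--     Remove < and > from text, returning the stripped text and
--     a position map: stripped_pos -> original_pos.
--     """
--     stripped_chars: list[str] = []
--     pos_map: list[int] = []  # index i -> original index for stripped[i]
--
--     for orig_i, ch in enumerate(text):
--         if ch in "<>":
--             continue
--         stripped_chars.append(ch)
--         pos_map.append(orig_i)
--
--     return "".join(stripped_chars), pos_map
-- ===== SOURCE B (Python) =====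
-- def strip_angle_brackets(text: str) -> tuple[str, list[int]]:
--     """
--     Remove < and > from text, returning the stripped text and
--     a position map: stripped_pos -> original_pos.
--     """
--     brackets = [i for i, ch in enumerate(text) if ch in "<>"]
--     parts: list[str] = []
--     pos_map: list[int] = []
--     lo = 0
--     for b in brackets + [len(text)]:
--         parts.append(text[lo:b])
--         pos_map.extend(range(lo, b))
--         lo = b + 1
--     return "".join(parts), pos_map
-- ===== Notes on version B (the rewrite author's own statement) =====
-- stated objective: alternative
-- what changed: Instead of A's fused char-by-char loop appending each kept character and index, B first collects the positions of all brackets, then reconstructs the text by joining the whole slices between consecutive bracket positions and the position map by extending with whole ranges.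
import Mathlib
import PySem

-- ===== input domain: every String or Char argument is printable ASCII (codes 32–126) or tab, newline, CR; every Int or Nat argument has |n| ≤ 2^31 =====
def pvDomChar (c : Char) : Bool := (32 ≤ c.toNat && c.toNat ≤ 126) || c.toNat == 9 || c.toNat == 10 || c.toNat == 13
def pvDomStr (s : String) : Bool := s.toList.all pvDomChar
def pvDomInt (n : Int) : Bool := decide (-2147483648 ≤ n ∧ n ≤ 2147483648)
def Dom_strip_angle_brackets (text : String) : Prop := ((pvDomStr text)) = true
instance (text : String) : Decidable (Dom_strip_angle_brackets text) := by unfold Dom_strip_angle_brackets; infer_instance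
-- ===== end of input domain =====

-- B re-implements the strip by a different algorithm: it first collects the bracket positions, then rebuilds the text from whole slices between consecutive brackets and the map from whole ranges, instead of A's fused char-by-char filter loop; objective: alternative (same O(n) cost).


-- ===== PORT A =====
-- A: one fused loop over enumerate(text) appending the kept char and its index to two accumulators.
def strip_angle_brackets (text : String) : String × List Int :=
  let r := (PySem.List.enumerate text.toList 0).foldl
    (fun (acc : List Char × List Int) (p : Int × Char) =>
      if p.2 == '<' || p.2 == '>' then acc
      else (acc.1 ++ [p.2], acc.2 ++ [p.1]))
    ([], [])
  (String.ofList r.1, r.2)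

-- ===== PORT B =====
-- B-side helpers: the bracket-position comprehension, and the loop body (append the slice text[lo:b], extend the map with range(lo, b), move lo past the bracket).
def sabBrackets (l : List Char) (s : Int) : List Int :=
  ((PySem.List.enumerate l s).filter (fun p => p.2 == '<' || p.2 == '>')).map (·.1)

def sabStep (l : List Char) (acc : List (List Char) × List Int × Int) (b : Int) :
    List (List Char) × List Int × Int :=
  (acc.1 ++ [PySem.List.slice l (some acc.2.2) (some b)],
   acc.2.1 ++ PySem.List.pyRange acc.2.2 b 1,
   b + 1)

-- B: collect bracket positions, then rebuild text and map from the inter-bracket segments.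
def strip_angle_brackets_alt (text : String) : String × List Int :=
  let l := text.toList
  let r := ((sabBrackets l 0) ++ [(l.length : Int)]).foldl (sabStep l) ([], [], 0)
  (String.ofList (PySem.Chars.join [] r.1), r.2.1)

-- ===== PRECONDITION & SPEC =====
def Spec_strip_angle_brackets (text : String) (out : String × List Int) : Prop := out = strip_angle_brackets_alt text
instance (text : String) (out : String × List Int) : Decidable (Spec_strip_angle_brackets text out) := by unfold Spec_strip_angle_brackets; infer_instance

-- ===== CLAIM (what is proved, stated in full; the proofs are below) =====
def Claim_equal_strip_angle_brackets : Prop := ∀ (text : String), Dom_strip_angle_brackets text → Spec_strip_angle_brackets text (strip_angle_brackets text)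

-- ===== LEMMAS AND PROOFS =====

-- A's fold appends exactly the kept characters and their indices.
theorem sab_fold_inv (l : List Char) (s : Int) (cs : List Char) (ps : List Int) :
    (PySem.List.enumerate l s).foldl
      (fun (acc : List Char × List Int) (p : Int × Char) =>
        if p.2 == '<' || p.2 == '>' then acc
        else (acc.1 ++ [p.2], acc.2 ++ [p.1]))
      (cs, ps)
    = (cs ++ l.filter (fun c => !(c == '<' || c == '>')),
       ps ++ ((PySem.List.enumerate l s).filter
         (fun p => !(p.2 == '<' || p.2 == '>'))).map (·.1)) := by
  induction l generalizing s cs ps with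
  | nil => simp [PySem.List.enumerate_nil]
  | cons x xs ih =>
    rw [PySem.List.enumerate_cons, List.foldl_cons, List.filter_cons, List.filter_cons]
    cases h : (x == '<' || x == '>') with
    | true => simpa using ih (s + 1) cs ps
    | false =>
      have hx := ih (s + 1) (cs ++ [x]) (ps ++ [s])
      rw [if_neg (by simp), hx]
      simp

-- "".join with the empty separator is flatten.
theorem sab_join_nil (ps : List (List Char)) : PySem.Chars.join [] ps = ps.flatten := by
  induction ps with
  | nil => simp [PySem.Chars.join, List.intercalate]
  | cons a t ih =>
    cases t with
    | nil => simp [PySem.Chars.join, List.intercalate]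
    | cons b u =>
      rw [PySem.Chars.join_cons_cons]
      simpa [PySem.Chars.join] using congrArg (a ++ ·) ih

-- every bracket position lies at or after the enumeration start
theorem sab_brackets_ge (l : List Char) (s : Int) : ∀ x ∈ sabBrackets l s, s ≤ x := by
  induction l generalizing s with
  | nil => simp [sabBrackets, PySem.List.enumerate_nil]
  | cons c t ih =>
    intro x hx
    unfold sabBrackets at hx
    rw [PySem.List.enumerate_cons, List.filter_cons] at hx
    by_cases h : (c == '<' || c == '>') = true
    · rw [if_pos h] at hx
      rcases List.mem_map.mp hx with ⟨p, hp, rfl⟩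
      rcases List.mem_cons.mp hp with rfl | hp'
      · exact le_refl s
      · have := ih (s + 1) p.1 (List.mem_map.mpr ⟨p, hp', rfl⟩)
        omega
    · rw [if_neg h] at hx
      have := ih (s + 1) x hx
      omega

-- the fold only appends: the accumulator prefixes factor out
theorem sab_foldl_prefix (l : List Char) (bs : List Int) (ps : List (List Char))
    (qs : List Int) (lo : Int) :
    bs.foldl (sabStep l) (ps, qs, lo)
    = (ps ++ (bs.foldl (sabStep l) ([], [], lo)).1,
       qs ++ (bs.foldl (sabStep l) ([], [], lo)).2.1,
       (bs.foldl (sabStep l) ([], [], lo)).2.2) := by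
  induction bs generalizing ps qs lo with
  | nil => simp
  | cons b tl ih =>
    simp only [List.foldl_cons]
    rw [show sabStep l (ps, qs, lo) b
        = (ps ++ [PySem.List.slice l (some lo) (some b)], qs ++ PySem.List.pyRange lo b 1, b + 1)
        from rfl]
    rw [show sabStep l ([], [], lo) b
        = ([] ++ [PySem.List.slice l (some lo) (some b)], [] ++ PySem.List.pyRange lo b 1, b + 1)
        from rfl]
    rw [ih (ps ++ [PySem.List.slice l (some lo) (some b)]) (qs ++ PySem.List.pyRange lo b 1) (b + 1),
        ih ([] ++ [PySem.List.slice l (some lo) (some b)]) ([] ++ PySem.List.pyRange lo b 1) (b + 1)]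
    simp

-- pulling one character off the front of a segment slice
theorem sab_slice_cons (l : List Char) (m : Nat) (b : Int) (c : Char) (rest : List Char)
    (hd : l.drop m = c :: rest) (hb : (m : Int) < b) :
    PySem.List.slice l (some (m : Int)) (some b)
      = c :: PySem.List.slice l (some ((m : Int) + 1)) (some b) := by
  have h1 : (0:Int) ≤ b := by omega
  rw [PySem.List.slice_toNat l (by omega) h1, PySem.List.slice_toNat l (by omega) h1]
  have hm : ((m : Int)).toNat = m := by omega
  have hm1 : ((m : Int) + 1).toNat = m + 1 := by omega
  have hrest : l.drop (m + 1) = rest := by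
    rw [← List.tail_drop, hd, List.tail_cons]
  rw [hm, hm1, hd, hrest]
  have hk : b.toNat - m = (b.toNat - (m + 1)) + 1 := by omega
  rw [hk, List.take_succ_cons]

-- MAIN: the segment fold over the suffix l.drop m rebuilds exactly the filtered chars and indices
theorem sab_main (t : List Char) (m : Nat) (l : List Char) (hd : l.drop m = t) :
    (((sabBrackets t (m : Int)) ++ [(l.length : Int)]).foldl (sabStep l) ([], [], (m : Int))).1.flatten
      = t.filter (fun c => !(c == '<' || c == '>'))
    ∧ (((sabBrackets t (m : Int)) ++ [(l.length : Int)]).foldl (sabStep l) ([], [], (m : Int))).2.1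
      = ((PySem.List.enumerate t (m : Int)).filter
          (fun p => !(p.2 == '<' || p.2 == '>'))).map (·.1) := by
  induction t generalizing m with
  | nil =>
    have hlen : l.length ≤ m := List.drop_eq_nil_iff.mp hd
    have hsl : PySem.List.slice l (some (m : Int)) (some (l.length : Int)) = [] := by
      rw [PySem.List.slice_toNat l (by omega) (by omega)]
      simp [hd]
    have hr : PySem.List.pyRange (m : Int) (l.length : Int) 1 = [] :=
      PySem.List.pyRange_one_eq_nil (by exact_mod_cast hlen)
    constructor <;> simp [sabBrackets, PySem.List.enumerate_nil, sabStep, hsl, hr]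
  | cons c rest ih =>
    have hm : m < l.length := by
      rcases Nat.lt_or_ge m l.length with h | h
      · exact h
      · exfalso
        rw [List.drop_eq_nil_iff.mpr h] at hd
        exact (List.cons_ne_nil c rest) hd.symm
    have hrest : l.drop (m + 1) = rest := by
      rw [← List.tail_drop, hd, List.tail_cons]
    have hcast : ((m : Int) + 1) = ((m + 1 : Nat) : Int) := by push_cast; ring
    by_cases hc : (c == '<' || c == '>') = true
    · have hbra : sabBrackets (c :: rest) (m : Int) = (m : Int) :: sabBrackets rest ((m : Int) + 1) := by
        unfold sabBrackets
        rw [PySem.List.enumerate_cons, List.filter_cons, if_pos hc]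
        simp
      rw [hbra, List.cons_append, List.foldl_cons]
      have hsl : PySem.List.slice l (some (m : Int)) (some (m : Int)) = [] := by
        rw [PySem.List.slice_toNat l (by omega) (by omega)]
        simp
      rw [show sabStep l ([], [], (m : Int)) (m : Int)
          = ([] ++ [PySem.List.slice l (some (m : Int)) (some (m : Int))],
             [] ++ PySem.List.pyRange (m : Int) (m : Int) 1, (m : Int) + 1) from rfl]
      rw [hsl, PySem.List.pyRange_one_eq_nil (le_refl (m : Int))]
      rw [sab_foldl_prefix l (sabBrackets rest ((m : Int) + 1) ++ [(l.length : Int)]) ([] ++ [[]]) ([] ++ []) ((m : Int) + 1)]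
      obtain ⟨ih1, ih2⟩ := ih (m + 1) hrest
      rw [← hcast] at ih1 ih2
      constructor
      · simp only [List.nil_append, List.singleton_append, List.flatten_cons,
          List.filter_cons, if_neg (by simp [hc] : ¬(!(c == '<' || c == '>')) = true)]
        exact ih1
      · simp only [List.nil_append]
        rw [PySem.List.enumerate_cons, List.filter_cons, if_neg (by simp [hc])]
        exact ih2
    · have hbra : sabBrackets (c :: rest) (m : Int) = sabBrackets rest ((m : Int) + 1) := by
        unfold sabBrackets
        rw [PySem.List.enumerate_cons, List.filter_cons, if_neg hc]
      rw [hbra]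
      obtain ⟨b0, bs', hbs, hb0⟩ :
          ∃ b0 bs', sabBrackets rest ((m : Int) + 1) ++ [(l.length : Int)] = b0 :: bs' ∧ (m : Int) < b0 := by
        cases hB : sabBrackets rest ((m : Int) + 1) with
        | nil => exact ⟨(l.length : Int), [], by simp, by exact_mod_cast hm⟩
        | cons b tl =>
          refine ⟨b, tl ++ [(l.length : Int)], by simp, ?_⟩
          have := sab_brackets_ge rest ((m : Int) + 1) b (by rw [hB]; exact List.mem_cons_self ..)
          omega
      rw [hbs, List.foldl_cons]
      rw [show sabStep l ([], [], (m : Int)) b0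
          = ([] ++ [PySem.List.slice l (some (m : Int)) (some b0)],
             [] ++ PySem.List.pyRange (m : Int) b0 1, b0 + 1) from rfl]
      rw [sab_foldl_prefix l bs' ([] ++ [PySem.List.slice l (some (m : Int)) (some b0)])
          ([] ++ PySem.List.pyRange (m : Int) b0 1) (b0 + 1)]
      obtain ⟨ih1, ih2⟩ := ih (m + 1) hrest
      rw [← hcast] at ih1 ih2
      rw [hbs, List.foldl_cons] at ih1 ih2
      rw [show sabStep l ([], [], (m : Int) + 1) b0
          = ([] ++ [PySem.List.slice l (some ((m : Int) + 1)) (some b0)],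
             [] ++ PySem.List.pyRange ((m : Int) + 1) b0 1, b0 + 1) from rfl] at ih1 ih2
      rw [sab_foldl_prefix l bs' ([] ++ [PySem.List.slice l (some ((m : Int) + 1)) (some b0)])
          ([] ++ PySem.List.pyRange ((m : Int) + 1) b0 1) (b0 + 1)] at ih1 ih2
      have hslice := sab_slice_cons l m b0 c rest hd hb0
      have hrange := PySem.List.pyRange_one_cons hb0
      constructor
      · simp only [List.nil_append, List.singleton_append, List.flatten_cons] at ih1 ⊢
        rw [hslice, List.filter_cons, if_pos (by simp [hc]), List.cons_append, ih1]
      · simp only [List.nil_append] at ih2 ⊢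
        rw [hrange, PySem.List.enumerate_cons, List.filter_cons, if_pos (by simp [hc]),
            List.cons_append, List.map_cons, ih2]

-- ===== VERDICT (by name: the statement is the Claim_ definition above) =====
theorem strip_angle_brackets_spec : Claim_equal_strip_angle_brackets := by
  intro text _
  unfold Spec_strip_angle_brackets
  obtain ⟨h1, h2⟩ := sab_main text.toList 0 text.toList (by simp)
  simp only [Nat.cast_zero] at h1 h2
  simp only [strip_angle_brackets, strip_angle_brackets_alt]
  rw [sab_fold_inv text.toList 0 [] [], sab_join_nil, h1, h2]
  simp
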